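-- pv_equiv track=rewrite | github.com/nanotech-empa/aiida-nanotech-empa | aiida_nanotech_empa/utils/analyze_structure.py | string_range_to_list
-- ===== SOURCE A (Python) =====
-- def string_range_to_list(strng, shift=-1):
--     """Converts a string like '1 3..5' into a list like [0, 2, 3, 4].
--     Shift used when e.g. for a user interface numbering starts from 1 not from 0"""
--     singles = [int(s) + shift for s in strng.split() if s.isdigit()]
--     ranges = [r for r in strng.split() if ".." in r]
--     if len(singles) + len(ranges) != len(strng.split()):
--         return [], False
--     for rng in ranges:
--         try:
--             start, end = rng.split("..")
--             singles += [i + shift for i in range(int(start), int(end) + 1)]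
--         except ValueError:
--             return [], False
--     return singles, True
-- ===== SOURCE B (Python) =====
-- def _expand(tok, shift):
--     """Expand a 'a..b' token into its shifted list, or None if malformed."""
--     parts = tok.split("..")
--     if len(parts) != 2:
--         return None
--     try:
--         start, end = int(parts[0]), int(parts[1])
--     except ValueError:
--         return None
--     return [i + shift for i in range(start, end + 1)]
--
--
-- def string_range_to_list(strng, shift=-1):
--     """Converts a string like '1 3..5' into a list like [0, 2, 3, 4].
--     Shift used when e.g. for a user interface numbering starts from 1 not from 0"""
--     singles = []
--     ranges_out = []
--     for tok in strng.split():
--         if tok.isdigit():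
--             singles.append(int(tok) + shift)
--         elif ".." in tok:
--             expanded = _expand(tok, shift)
--             if expanded is None:
--                 return [], False
--             ranges_out += expanded
--         else:
--             return [], False
--     return singles + ranges_out, True
-- ===== Notes on version B (the rewrite author's own statement) =====
-- stated objective: simpler
-- what changed: Replaces A's three separate passes over strng.split() (a digit-filter comprehension, a '..'-filter comprehension, a length-sum validity check) plus a trailing try/except expansion loop with a single classifying pass per token that fails fast on the first malformed token.
import Mathlib
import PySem

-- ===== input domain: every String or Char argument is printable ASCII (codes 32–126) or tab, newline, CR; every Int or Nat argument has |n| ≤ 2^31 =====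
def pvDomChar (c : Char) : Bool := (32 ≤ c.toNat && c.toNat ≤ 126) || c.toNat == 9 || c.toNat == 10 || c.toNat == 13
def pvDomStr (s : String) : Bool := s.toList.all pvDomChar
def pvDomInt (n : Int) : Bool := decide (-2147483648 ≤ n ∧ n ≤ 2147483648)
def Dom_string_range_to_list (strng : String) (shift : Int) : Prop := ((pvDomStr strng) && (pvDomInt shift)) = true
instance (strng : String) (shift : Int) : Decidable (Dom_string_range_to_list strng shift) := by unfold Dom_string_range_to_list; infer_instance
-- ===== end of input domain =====

-- B replaces A's three filter/count passes over the tokens plus a trailing expansion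
-- loop with a single classifying pass per token that fails fast (objective: simpler).

-- ===== PORT A =====
-- the 'for rng in ranges' loop of A; the try/except ValueError is the two fallthrough match arms
def srtlLoopA (shift : Int) : List Int → List String → List Int × Bool
  | singles, [] => (singles, true)
  | singles, rng :: rest =>
    match PySem.Str.split? rng ".." with      -- start, end = rng.split("..") ; ≠ 2 parts = ValueError
    | some [st, en] =>
      match PySem.Int.ofStr? st, PySem.Int.ofStr? en with
      | some s, some e =>
          srtlLoopA shift (singles ++ (PySem.List.pyRange s (e + 1) 1).map (fun i => i + shift)) rest
      | _, _ => ([], false)                    -- int() raised ValueError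
    | _ => ([], false)

def string_range_to_list (strng : String) (shift : Int) : List Int × Bool :=
  let singles := ((PySem.Str.split₀ strng).filter (fun s => PySem.Str.strIsdigit s)).map
      (fun s => (PySem.Int.ofStr? s).getD 0 + shift)  -- int(s) on an isdigit token always succeeds, so .getD 0 is exact
  let ranges := (PySem.Str.split₀ strng).filter (fun r => PySem.Str.isIn ".." r)
  if singles.length + ranges.length ≠ (PySem.Str.split₀ strng).length then ([], false)
  else srtlLoopA shift singles ranges

-- ===== PORT B =====
-- Source B's _expand: the shifted expansion of an 'a..b' token, none if malformed
def srtlExpand (tok : String) (shift : Int) : Option (List Int) :=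
  match PySem.Str.split? tok ".." with
  | some [a, b] =>
    match PySem.Int.ofStr? a, PySem.Int.ofStr? b with
    | some s, some e => some ((PySem.List.pyRange s (e + 1) 1).map (fun i => i + shift))
    | _, _ => none
  | _ => none

-- Source B's single loop over the tokens, carrying the two accumulators
def srtlLoopB (shift : Int) : List Int → List Int → List String → List Int × Bool
  | singles, rangesOut, [] => (singles ++ rangesOut, true)
  | singles, rangesOut, tok :: rest =>
    if PySem.Str.strIsdigit tok then
      srtlLoopB shift (singles ++ [(PySem.Int.ofStr? tok).getD 0 + shift]) rangesOut rest
    else if PySem.Str.isIn ".." tok then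
      match srtlExpand tok shift with
      | some x => srtlLoopB shift singles (rangesOut ++ x) rest
      | none => ([], false)
    else ([], false)

def string_range_to_list_alt (strng : String) (shift : Int) : List Int × Bool :=
  srtlLoopB shift [] [] (PySem.Str.split₀ strng)

-- ===== PRECONDITION & SPEC =====
def Spec_string_range_to_list (strng : String) (shift : Int) (out : List Int × Bool) : Prop := out = string_range_to_list_alt strng shift
instance (strng : String) (shift : Int) (out : List Int × Bool) : Decidable (Spec_string_range_to_list strng shift out) := by unfold Spec_string_range_to_list; infer_instance

-- ===== CLAIM (what is proved, stated in full; the proofs are below) =====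
def Claim_equal_string_range_to_list : Prop := ∀ (strng : String) (shift : Int), Dom_string_range_to_list strng shift → Spec_string_range_to_list strng shift (string_range_to_list strng shift)

-- ===== LEMMAS AND PROOFS =====

-- the combined result of expanding a list of range tokens left to right (none = some token malformed)
def srtlEvalR (shift : Int) : List String → Option (List Int)
  | [] => some []
  | r :: rest =>
    match srtlExpand r shift, srtlEvalR shift rest with
    | some x, some xs => some (x ++ xs)
    | _, _ => none

lemma srtl_digit_not_dots (t : String) (h : PySem.Str.strIsdigit t = true) :
    PySem.Str.isIn ".." t = false := by
  rw [← Bool.not_eq_true, PySem.Str.isIn_iff_infix]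
  intro hinf
  have hm : '.' ∈ t.toList := hinf.mem (by decide)
  simp [PySem.Str.strIsdigit_eq, PySem.Chars.strIsdigit, List.all_eq_true] at h
  have := h.2 _ hm
  simp [PySem.Chars.isdigit] at this

lemma srtl_loopA_cons (shift : Int) (acc : List Int) (r : String) (rest : List String) :
    srtlLoopA shift acc (r :: rest) =
      match srtlExpand r shift with
      | some x => srtlLoopA shift (acc ++ x) rest
      | none => ([], false) := by
  cases hs : PySem.Str.split? r ".." with
  | none => simp [srtlLoopA, srtlExpand, hs]
  | some parts =>
    match parts with
    | [] => simp [srtlLoopA, srtlExpand, hs]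
    | [a] => simp [srtlLoopA, srtlExpand, hs]
    | a :: b :: c :: t => simp [srtlLoopA, srtlExpand, hs]
    | [a, b] =>
      cases ha : PySem.Int.ofStr? a <;> cases hb : PySem.Int.ofStr? b <;>
        simp [srtlLoopA, srtlExpand, hs, ha, hb]

lemma srtl_loopA_eq (shift : Int) (rs : List String) : ∀ acc : List Int,
    srtlLoopA shift acc rs =
      match srtlEvalR shift rs with
      | some xs => (acc ++ xs, true)
      | none => ([], false) := by
  induction rs with
  | nil => intro acc; simp [srtlLoopA, srtlEvalR]
  | cons r rest ih =>
    intro acc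
    rw [srtl_loopA_cons]
    cases hx : srtlExpand r shift with
    | none => simp [srtlEvalR, hx]
    | some x =>
      cases hr : srtlEvalR shift rest <;> simp [srtlEvalR, hx, hr, ih]

lemma srtl_loopB_eq (shift : Int) (toks : List String) : ∀ s r : List Int,
    srtlLoopB shift s r toks =
      if toks.all (fun t => PySem.Str.strIsdigit t || PySem.Str.isIn ".." t) then
        match srtlEvalR shift (toks.filter (fun t => PySem.Str.isIn ".." t)) with
        | some xs =>
            (s ++ (toks.filter (fun t => PySem.Str.strIsdigit t)).map
                (fun t => (PySem.Int.ofStr? t).getD 0 + shift) ++ (r ++ xs), true)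
        | none => ([], false)
      else ([], false) := by
  induction toks with
  | nil => intro s r; simp [srtlLoopB, srtlEvalR]
  | cons tok rest ih =>
    intro s r
    simp only [srtlLoopB]
    by_cases hd : PySem.Str.strIsdigit tok = true
    · have hnd := srtl_digit_not_dots tok hd
      rw [if_pos hd, ih, List.all_cons, hd, List.filter_cons_of_pos hd,
        List.filter_cons_of_neg (by simpa using hnd)]
      simp only [Bool.true_or, Bool.true_and]
      by_cases hall : rest.all (fun t => PySem.Str.strIsdigit t || PySem.Str.isIn ".." t) = true
      · rw [if_pos hall, if_pos hall]
        cases hr : srtlEvalR shift (rest.filter (fun t => PySem.Str.isIn ".." t)) <;>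
          simp [-PySem.Str.strIsdigit_eq, -PySem.Str.isIn_eq]
      · rw [if_neg hall, if_neg hall]
    · have hd' : PySem.Str.strIsdigit tok = false := by simpa using hd
      rw [if_neg hd]
      by_cases hdot : PySem.Str.isIn ".." tok = true
      · rw [if_pos hdot, List.all_cons, hd', hdot, List.filter_cons_of_pos hdot]
        simp only [Bool.false_or, Bool.true_and]
        cases hx : srtlExpand tok shift with
        | none =>
          show (([], false) : List Int × Bool) = _
          by_cases hall : rest.all (fun t => PySem.Str.strIsdigit t || PySem.Str.isIn ".." t) = true
          · rw [if_pos hall]; simp [srtlEvalR, hx, -PySem.Str.strIsdigit_eq, -PySem.Str.isIn_eq]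
          · rw [if_neg hall]
        | some x =>
          show srtlLoopB shift s (r ++ x) rest = _
          rw [ih]
          by_cases hall : rest.all (fun t => PySem.Str.strIsdigit t || PySem.Str.isIn ".." t) = true
          · rw [if_pos hall, if_pos hall]
            cases hr : srtlEvalR shift (rest.filter (fun t => PySem.Str.isIn ".." t)) <;>
              simp [srtlEvalR, hx, hr, hd', -PySem.Str.strIsdigit_eq, -PySem.Str.isIn_eq]
          · rw [if_neg hall, if_neg hall]
      · have hdot' : PySem.Str.isIn ".." tok = false := by simpa using hdot
        rw [if_neg hdot, List.all_cons, hd', hdot']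
        simp

lemma srtl_filter_len_le {α : Type} (p q : α → Bool) (l : List α)
    (h : ∀ x ∈ l, p x = true → q x = false) :
    (l.filter p).length + (l.filter q).length ≤ l.length := by
  induction l with
  | nil => simp
  | cons x xs ih =>
    have ih' := ih (fun y hy => h y (List.mem_cons_of_mem _ hy))
    by_cases hp : p x = true
    · have hq := h x (List.mem_cons_self) hp
      simp [hp, hq]; omega
    · have hp' : p x = false := by simpa using hp
      by_cases hq : q x = true <;> simp [hp', hq] <;> omega

lemma srtl_count_iff_all {α : Type} (p q : α → Bool) (l : List α)
    (h : ∀ x ∈ l, p x = true → q x = false) :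
    ((l.filter p).length + (l.filter q).length = l.length) ↔
      l.all (fun x => p x || q x) = true := by
  induction l with
  | nil => simp
  | cons x xs ih =>
    have ih' := ih (fun y hy => h y (List.mem_cons_of_mem _ hy))
    have hle := srtl_filter_len_le p q xs (fun y hy => h y (List.mem_cons_of_mem _ hy))
    by_cases hp : p x = true
    · have hq := h x (List.mem_cons_self) hp
      simp [hp, hq, ih'.symm]; omega
    · have hp' : p x = false := by simpa using hp
      by_cases hq : q x = true
      · simp [hp', hq, ih'.symm]; omega
      · have hq' : q x = false := by simpa using hq
        simp [hp', hq']
        omega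

-- ===== VERDICT (by name: the statement is the Claim_ definition above) =====
theorem string_range_to_list_spec : Claim_equal_string_range_to_list := by
  intro strng shift _
  show string_range_to_list strng shift = string_range_to_list_alt strng shift
  simp only [string_range_to_list, string_range_to_list_alt]
  rw [srtl_loopB_eq]
  have hdisj : ∀ t ∈ PySem.Str.split₀ strng,
      PySem.Str.strIsdigit t = true → PySem.Str.isIn ".." t = false :=
    fun t _ => srtl_digit_not_dots t
  have hcnt := srtl_count_iff_all (fun t => PySem.Str.strIsdigit t)
      (fun t => PySem.Str.isIn ".." t) (PySem.Str.split₀ strng) hdisj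
  have hlen : (((PySem.Str.split₀ strng).filter (fun s => PySem.Str.strIsdigit s)).map
      (fun s => (PySem.Int.ofStr? s).getD 0 + shift)).length =
      ((PySem.Str.split₀ strng).filter (fun s => PySem.Str.strIsdigit s)).length := by
    simp
  by_cases hall : (PySem.Str.split₀ strng).all
      (fun t => PySem.Str.strIsdigit t || PySem.Str.isIn ".." t) = true
  · have hc := hcnt.mpr hall
    rw [if_pos hall, if_neg (by rw [hlen]; exact not_not_intro hc)]
    rw [srtl_loopA_eq]
    cases hr : srtlEvalR shift
        ((PySem.Str.split₀ strng).filter (fun t => PySem.Str.isIn ".." t)) <;>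
      simp [-PySem.Str.strIsdigit_eq, -PySem.Str.isIn_eq]
  · have hc := fun h => hall (hcnt.mp h)
    rw [if_neg hall, if_pos (by rw [hlen]; exact hc)]
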